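-- pv_equiv track=rewrite | github.com/Introduction-to-Programming-OSOWSKI/3-4-factorialorsumbetween-LucasCross2023 | main.py | factORsum
-- ===== SOURCE A (Python) =====
-- def factORsum(x, word):
--     if word == "factorial":
--         total = 1
--         for i in range (1, x+1):
--             total = total * i
--
--     else:
--         total = 0
--         for i in range (1, x+1):
--             total = total + i
--
--     return total
-- ===== SOURCE B (Python) =====
-- def factORsum(x, word):
--     # Simpler: factorial by a descending countdown, sum by the closed form x*(x+1)//2.
--     if word == "factorial":
--         total = 1
--         n = x
--         while n > 0:
--             total *= n
--             n -= 1
--         return total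
--     n = max(x, 0)
--     return n * (n + 1) // 2
-- ===== Notes on version B (the rewrite author's own statement) =====
-- stated objective: simpler
-- what changed: The sum branch becomes the closed form max(x,0)*(max(x,0)+1)//2 instead of an O(x) accumulation loop, and the factorial branch counts down with a while loop instead of iterating over range(1, x+1).
import Mathlib
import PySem

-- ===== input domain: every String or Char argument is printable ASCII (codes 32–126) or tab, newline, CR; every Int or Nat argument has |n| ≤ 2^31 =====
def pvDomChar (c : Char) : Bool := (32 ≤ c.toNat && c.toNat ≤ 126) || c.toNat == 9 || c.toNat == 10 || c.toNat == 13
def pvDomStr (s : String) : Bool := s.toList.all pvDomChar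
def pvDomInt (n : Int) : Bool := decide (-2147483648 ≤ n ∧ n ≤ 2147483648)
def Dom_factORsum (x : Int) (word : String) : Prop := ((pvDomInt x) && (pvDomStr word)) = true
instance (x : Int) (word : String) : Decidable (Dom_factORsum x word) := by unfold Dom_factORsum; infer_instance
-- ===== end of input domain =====

-- B changes the sum branch to the closed form max(x,0)*(x+1)//2 and counts the factorial down; objective: simpler.

-- ===== PORT A =====
def factORsum (x : Int) (word : String) : Int :=
  if word = "factorial" then
    (PySem.List.pyRange 1 (x + 1) 1).foldl (fun total i => total * i) 1
  else
    (PySem.List.pyRange 1 (x + 1) 1).foldl (fun total i => total + i) 0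

-- ===== PORT B =====
-- 'while n > 0: total *= n; n -= 1' from Source B, as structural recursion on n.toNat
def pvFactDown (n : Int) (total : Int) : Int :=
  if _h : 0 < n then pvFactDown (n - 1) (total * n) else total
termination_by n.toNat
decreasing_by omega

def factORsum_alt (x : Int) (word : String) : Int :=
  if word = "factorial" then
    pvFactDown x 1
  else
    let n := max x 0
    PySem.Int.floordiv (n * (n + 1)) 2

-- ===== PRECONDITION & SPEC =====
def Spec_factORsum (x : Int) (word : String) (out : Int) : Prop := out = factORsum_alt x word
instance (x : Int) (word : String) (out : Int) : Decidable (Spec_factORsum x word out) := by unfold Spec_factORsum; infer_instance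

-- ===== CLAIM (what is proved, stated in full; the proofs are below) =====
def Claim_equal_factORsum : Prop := ∀ (x : Int) (word : String), Dom_factORsum x word → Spec_factORsum x word (factORsum x word)

-- ===== LEMMAS AND PROOFS =====

theorem pvFactDown_eq_prod (n : Int) (acc : Int) :
    pvFactDown n acc = acc * (PySem.List.pyRange 1 (n + 1) 1).prod := by
  by_cases h : 0 < n
  · have ih := pvFactDown_eq_prod (n - 1) (acc * n)
    rw [pvFactDown, dif_pos h, ih]
    have hsplit : PySem.List.pyRange 1 (n + 1) 1 = PySem.List.pyRange 1 n 1 ++ [n] := by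
      have := PySem.List.pyRange_one_succ_right (a := 1) (b := n) (by omega)
      simpa using this
    have hone : n - 1 + 1 = n := by ring
    rw [hone, hsplit]
    simp [List.prod_append]
    ring
  · rw [pvFactDown, dif_neg h]
    rw [PySem.List.pyRange_one_eq_nil (by omega)]
    simp
termination_by n.toNat
decreasing_by omega

theorem pvSum_closed (n : Int) :
    2 * (PySem.List.pyRange 1 (n + 1) 1).sum = max n 0 * (max n 0 + 1) := by
  by_cases h : 0 < n
  · have ih := pvSum_closed (n - 1)
    have hsplit : PySem.List.pyRange 1 (n + 1) 1 = PySem.List.pyRange 1 n 1 ++ [n] := by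
      have := PySem.List.pyRange_one_succ_right (a := 1) (b := n) (by omega)
      simpa using this
    rw [hsplit, List.sum_append]
    have hn : max n 0 = n := by omega
    have hn' : max (n - 1) 0 = n - 1 := by omega
    rw [hn' ] at ih
    simp only [List.sum_cons, List.sum_nil, hn]
    have : n - 1 + 1 = n := by ring
    rw [this] at ih
    nlinarith [ih]
  · rw [PySem.List.pyRange_one_eq_nil (by omega)]
    have hn : max n 0 = 0 := by omega
    simp [hn]
termination_by n.toNat
decreasing_by omega

theorem foldl_mul_eq_prod (l : List Int) (a : Int) :
    l.foldl (fun total i => total * i) a = a * l.prod := by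
  induction l generalizing a with
  | nil => simp
  | cons x xs ih => simp [List.foldl_cons, ih, mul_assoc]

theorem foldl_add_eq_sum (l : List Int) (a : Int) :
    l.foldl (fun total i => total + i) a = a + l.sum := by
  induction l generalizing a with
  | nil => simp
  | cons x xs ih => simp [List.foldl_cons, ih]; ring

-- ===== VERDICT (by name: the statement is the Claim_ definition above) =====
theorem factORsum_spec : Claim_equal_factORsum := by
  intro x word _
  unfold Spec_factORsum factORsum factORsum_alt
  by_cases hw : word = "factorial"
  · rw [if_pos hw, if_pos hw]
    rw [foldl_mul_eq_prod, pvFactDown_eq_prod, one_mul]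
  · rw [if_neg hw, if_neg hw]
    rw [foldl_add_eq_sum]
    have h2 := pvSum_closed x
    have hd : PySem.Int.floordiv (max x 0 * (max x 0 + 1)) 2 = (max x 0 * (max x 0 + 1)) / 2 :=
      PySem.Int.floordiv_eq_ediv_of_pos (by omega)
    rw [hd, ← h2]
    omega
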